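-- pv_equiv track=rewrite | github.com/tuan8p/gcn-convert-13-to-25-joints | ssr_gcn/data.py | _build_class_maps
-- ===== SOURCE A (Python) =====
-- from typing import Any
--
-- def _build_class_maps(
--     by_subject: dict[str, list[dict[str, Any]]],
-- ) -> tuple[dict[str, set[str]], dict[str, set[str]], set[str]]:
--     subject_to_classes: dict[str, set[str]] = {}
--     class_to_subjects: dict[str, set[str]] = {}
--     for sid, items in by_subject.items():
--         labels = {item.get("action_id") for item in items if item.get("action_id")}
--         if not labels:
--             continue
--         subject_to_classes[sid] = labels
--         for label in labels:
--             class_to_subjects.setdefault(label, set()).add(sid)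
--     excluded = {label for label, subjects in class_to_subjects.items() if len(subjects) < 2}
--     for label in excluded:
--         class_to_subjects.pop(label, None)
--     return class_to_subjects, subject_to_classes, excluded
-- ===== SOURCE B (Python) =====
-- from collections import Counter
-- from typing import Any
--
-- def _build_class_maps(
--     by_subject: dict[str, list[dict[str, Any]]],
-- ) -> tuple[dict[str, set[str]], dict[str, set[str]], set[str]]:
--     # Flatten to a deduplicated (sid, label) edge list (and the subject map as a side product).
--     subject_to_classes: dict[str, set[str]] = {}
--     edges: list[tuple[str, str]] = []
--     for sid, items in by_subject.items():
--         labels = {item.get("action_id") for item in items if item.get("action_id")}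
--         if labels:
--             subject_to_classes[sid] = labels
--             edges.extend((sid, label) for label in labels)
--     # One Counter over the edge labels gives each label's subject count up front,
--     # so common labels are assembled directly and rare ones are never inserted.
--     counts = Counter(label for _, label in edges)
--     class_to_subjects: dict[str, set[str]] = {}
--     excluded: set[str] = set()
--     for sid, label in edges:
--         if counts[label] >= 2:
--             class_to_subjects.setdefault(label, set()).add(sid)
--         else:
--             excluded.add(label)
--     return class_to_subjects, subject_to_classes, excluded
-- ===== Notes on version B (the rewrite author's own statement) =====
-- stated objective: alternative
-- what changed: A builds the full label->subjects inverse dict interleaved with the subject loop and then pops the rare labels back out; B instead flattens the data to a deduplicated (sid, label) edge list, counts each label's subjects with a single Counter, and rebuilds class_to_subjects in one selective pass that never inserts a rare label (excluded collected in the same pass).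
import Mathlib
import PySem

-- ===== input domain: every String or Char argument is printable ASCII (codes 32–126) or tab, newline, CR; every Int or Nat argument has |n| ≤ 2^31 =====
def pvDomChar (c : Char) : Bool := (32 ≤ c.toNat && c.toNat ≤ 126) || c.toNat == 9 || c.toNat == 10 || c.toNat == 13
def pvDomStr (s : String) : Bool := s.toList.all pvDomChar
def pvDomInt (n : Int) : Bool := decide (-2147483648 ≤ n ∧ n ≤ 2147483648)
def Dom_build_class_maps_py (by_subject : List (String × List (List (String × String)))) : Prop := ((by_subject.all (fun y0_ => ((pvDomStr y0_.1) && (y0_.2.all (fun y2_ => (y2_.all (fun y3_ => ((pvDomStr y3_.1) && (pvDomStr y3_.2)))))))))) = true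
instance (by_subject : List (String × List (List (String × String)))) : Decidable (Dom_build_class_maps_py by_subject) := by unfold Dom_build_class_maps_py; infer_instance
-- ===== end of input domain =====

-- B replaces A's build-the-full-inverse-then-pop strategy by a flat (sid, label) edge
-- list, a Counter over its labels, and one selective rebuild pass that never inserts a
-- rare label; objective: alternative (different decomposition, same asymptotic cost).

-- ===== PORT A =====
-- {item.get("action_id") for item in items if item.get("action_id")}
-- (the same comprehension line occurs verbatim in both Pythons, so both ports share it)
def pyLabels (items : List (List (String × String))) : PySem.Set String :=
  PySem.Set.ofList (items.filterMap (fun item =>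
    match (PySem.Dict.mk item).get? "action_id" with
    | some v => if v = "" then none else some v
    | none => none))

def build_class_maps_py (by_subject : List (String × List (List (String × String)))) : (List (String × List String)) × (List (String × List String)) × List String :=
  let st := by_subject.foldl
    (fun (st : PySem.Dict String (PySem.Set String) × PySem.Dict String (PySem.Set String)) e =>
      let labels := pyLabels e.2
      if labels = [] then st                       -- if not labels: continue
      else (st.1.insert e.1 labels,                -- subject_to_classes[sid] = labels
            -- for label in labels: class_to_subjects.setdefault(label, set()).add(sid)
            labels.foldl (fun c label => c.modify label PySem.Set.empty (fun s => PySem.Set.add s e.1)) st.2))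
    (PySem.Dict.empty, PySem.Dict.empty)
  let excluded := PySem.Set.ofList
    (((st.2.items.filter (fun p => PySem.Set.len p.2 < 2))).map Prod.fst)
  -- for label in excluded: class_to_subjects.pop(label, None)
  let c2s := excluded.foldl (fun d label => d.erase label) st.2
  (c2s.items, st.1.items, excluded)

-- ===== PORT B =====
def build_class_maps_py_alt (by_subject : List (String × List (List (String × String)))) : (List (String × List String)) × (List (String × List String)) × List String :=
  -- Flatten to a deduplicated (sid, label) edge list (subject map as a side product)
  let st := by_subject.foldl
    (fun (st : PySem.Dict String (PySem.Set String) × List (String × String)) e =>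
      let labels := pyLabels e.2
      if labels ≠ [] then
        (st.1.insert e.1 labels, st.2 ++ labels.map (fun label => (e.1, label)))
      else st)
    (PySem.Dict.empty, [])
  -- counts = Counter(label for _, label in edges)
  let counts := PySem.Dict.counter (st.2.map (fun q => q.2))
  -- One pass over the edges: common labels assembled directly, rare ones collected
  let st2 := st.2.foldl
    (fun (st2 : PySem.Dict String (PySem.Set String) × PySem.Set String) q =>
      if 2 ≤ counts.getD q.2 0 then
        (st2.1.modify q.2 PySem.Set.empty (fun s => PySem.Set.add s q.1), st2.2)
      else (st2.1, PySem.Set.add st2.2 q.2))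
    (PySem.Dict.empty, PySem.Set.empty)
  (st2.1.items, st.1.items, st2.2)

-- ===== PRECONDITION & SPEC =====
-- Pre_ excludes association lists whose subject keys repeat: such a list encodes no Python
-- dict (A's parameter is dict[str, ...], whose keys are necessarily distinct), and on the
-- list encoding the two dict-building strategies would keep different duplicates.
def Pre_build_class_maps_py (by_subject : List (String × List (List (String × String)))) : Prop :=
  (by_subject.map Prod.fst).Nodup
instance (by_subject : List (String × List (List (String × String)))) : Decidable (Pre_build_class_maps_py by_subject) := by unfold Pre_build_class_maps_py; infer_instance

def pvWitness_build_class_maps_py : (List (String × List (List (String × String)))) :=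
  [("s1", [[("action_id", "a")]]), ("s2", [[("action_id", "a")], [("action_id", "b")]])]

def Spec_build_class_maps_py (by_subject : List (String × List (List (String × String)))) (out : (List (String × List String)) × (List (String × List String)) × List String) : Prop := out = build_class_maps_py_alt by_subject
instance (by_subject : List (String × List (List (String × String)))) (out : (List (String × List String)) × (List (String × List String)) × List String) : Decidable (Spec_build_class_maps_py by_subject out) := by unfold Spec_build_class_maps_py; infer_instance

-- ===== CLAIM (what is proved, stated in full; the proofs are below) =====
def Claim_equal_build_class_maps_py : Prop := ∀ (by_subject : List (String × List (List (String × String)))), Dom_build_class_maps_py by_subject → Pre_build_class_maps_py by_subject → Spec_build_class_maps_py by_subject (build_class_maps_py by_subject)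

-- ===== LEMMAS AND PROOFS =====

-- proof-local abbreviations for the loop bodies and the edge list
def stepS (d : PySem.Dict String (PySem.Set String)) (e : String × List (List (String × String))) : PySem.Dict String (PySem.Set String) :=
  if pyLabels e.2 ≠ [] then d.insert e.1 (pyLabels e.2) else d

def gEntry (e : String × List (List (String × String))) : Option (String × PySem.Set String) :=
  if pyLabels e.2 = [] then none else some (e.1, pyLabels e.2)

def stepE (c : PySem.Dict String (PySem.Set String)) (q : String × String) : PySem.Dict String (PySem.Set String) :=
  c.modify q.2 PySem.Set.empty (fun s => PySem.Set.add s q.1)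

def pushc (c : PySem.Dict String (PySem.Set String)) (sid : String) (labels : PySem.Set String) : PySem.Dict String (PySem.Set String) :=
  labels.foldl (fun c label => c.modify label PySem.Set.empty (fun s => PySem.Set.add s sid)) c

def stepC (c : PySem.Dict String (PySem.Set String)) (e : String × List (List (String × String))) : PySem.Dict String (PySem.Set String) :=
  (gEntry e).elim c (fun p => pushc c p.1 p.2)

def edgesOf (bs : List (String × List (List (String × String)))) : List (String × String) :=
  (bs.filterMap gEntry).flatMap (fun p => p.2.map (fun l => (p.1, l)))

-- the subject list a label collects from an edge list
def sidsOf (E : List (String × String)) (l : String) : List String :=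
  (E.filter (fun q => q.2 == l)).map Prod.fst

-- A's paired fold splits into two independent folds
theorem foldA_split (l : List (String × List (List (String × String))))
    (s c : PySem.Dict String (PySem.Set String)) :
    l.foldl (fun (st : PySem.Dict String (PySem.Set String) × PySem.Dict String (PySem.Set String)) e =>
      if pyLabels e.2 = [] then st
      else (st.1.insert e.1 (pyLabels e.2),
            (pyLabels e.2).foldl (fun c label => c.modify label PySem.Set.empty (fun s => PySem.Set.add s e.1)) st.2))
      (s, c)
    = (l.foldl stepS s, l.foldl stepC c) := by
  induction l generalizing s c with
  | nil => rfl
  | cons e t ih =>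
      simp only [List.foldl_cons]
      by_cases h : pyLabels e.2 = [] <;>
        simp only [stepS, stepC, gEntry, pushc, h, if_pos, if_neg, ne_eq, not_true_eq_false,
          not_false_eq_true] <;>
      exact ih _ _

-- B's first fold splits into the subject fold and the edge list
theorem foldB_split (l : List (String × List (List (String × String))))
    (s : PySem.Dict String (PySem.Set String)) (acc : List (String × String)) :
    l.foldl (fun (st : PySem.Dict String (PySem.Set String) × List (String × String)) e =>
      if pyLabels e.2 ≠ [] then
        (st.1.insert e.1 (pyLabels e.2), st.2 ++ (pyLabels e.2).map (fun label => (e.1, label)))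
      else st) (s, acc)
    = (l.foldl stepS s, acc ++ edgesOf l) := by
  induction l generalizing s acc with
  | nil => simp [edgesOf]
  | cons e t ih =>
      simp only [List.foldl_cons]
      by_cases h : pyLabels e.2 = []
      · rw [if_neg (by simp [h]), ih]
        simp only [stepS, h, ne_eq, not_true_eq_false, if_false]
        have : edgesOf (e :: t) = edgesOf t := by
          simp [edgesOf, gEntry, h]
        rw [this]
      · rw [if_pos (by simp [h]), ih]
        simp only [stepS, h, ne_eq, not_false_eq_true, if_true]
        have : edgesOf (e :: t) = (pyLabels e.2).map (fun label => (e.1, label)) ++ edgesOf t := by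
          simp [edgesOf, gEntry, h]
        rw [this, List.append_assoc]

-- B's second fold splits into the selective dict fold and the rare-label fold
theorem foldB2_split (D0 : List String) (l : List (String × String))
    (c : PySem.Dict String (PySem.Set String)) (s : PySem.Set String) :
    l.foldl (fun (st2 : PySem.Dict String (PySem.Set String) × PySem.Set String) q =>
      if 2 ≤ (PySem.Dict.counter D0).getD q.2 0 then
        (st2.1.modify q.2 PySem.Set.empty (fun s => PySem.Set.add s q.1), st2.2)
      else (st2.1, PySem.Set.add st2.2 q.2)) (c, s)
    = (l.foldl (fun c q => if 2 ≤ (PySem.Dict.counter D0).getD q.2 0 then stepE c q else c) c,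
       l.foldl (fun s q => if 2 ≤ (PySem.Dict.counter D0).getD q.2 0 then s else PySem.Set.add s q.2) s) := by
  induction l generalizing c s with
  | nil => rfl
  | cons q t ih =>
      simp only [List.foldl_cons]
      by_cases h : 2 ≤ (PySem.Dict.counter D0).getD q.2 0
      · rw [if_pos h, if_pos h, if_pos h]; exact ih _ _
      · rw [if_neg h, if_neg h, if_neg h]; exact ih _ _

-- A's inverse-building fold over the entries IS the plain edge fold
theorem foldC_eq_edge_fold (bs : List (String × List (List (String × String))))
    (c : PySem.Dict String (PySem.Set String)) :
    bs.foldl stepC c = (edgesOf bs).foldl stepE c := by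
  rw [edgesOf, List.foldl_flatMap]
  induction bs generalizing c with
  | nil => rfl
  | cons e t ih =>
      by_cases h : pyLabels e.2 = []
      · rw [List.filterMap_cons_none (by simp [gEntry, h]), List.foldl_cons, ← ih]
        simp [stepC, gEntry, h]
      · rw [List.filterMap_cons_some (show gEntry e = some (e.1, pyLabels e.2) by simp [gEntry, h]),
            List.foldl_cons, List.foldl_cons, ← ih, List.foldl_map]
        simp [stepC, gEntry, h, pushc, stepE]

-- a fold of erasures filters the items by the erased keys
theorem items_foldl_erase (ks : List String) (c : PySem.Dict String (PySem.Set String)) :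
    (ks.foldl (fun d label => d.erase label) c).items
      = c.items.filter (fun p => !ks.contains p.1) := by
  induction ks generalizing c with
  | nil => simp
  | cons k t ih =>
      simp only [List.foldl_cons]
      rw [ih (c.erase k)]
      simp only [PySem.Dict.erase, List.filter_filter]
      apply List.filter_congr
      intro p _
      simp [Bool.not_or, Bool.and_comm, beq_eq_decide]

-- popping every rare label filters the dict down to the common ones
theorem tail_eq (c : PySem.Dict String (PySem.Set String))
    (hkeys : (c.items.map Prod.fst).Nodup) :
    ((PySem.Set.ofList ((c.items.filter (fun p => PySem.Set.len p.2 < 2)).map Prod.fst)).foldl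
        (fun d label => d.erase label) c).items
      = c.items.filter (fun p => 2 ≤ PySem.Set.len p.2) := by
  have hex_nodup : ((c.items.filter (fun p => PySem.Set.len p.2 < 2)).map Prod.fst).Nodup :=
    (List.filter_sublist.map Prod.fst).nodup hkeys
  rw [PySem.Set.ofList_eq_self_of_nodup _ hex_nodup, items_foldl_erase]
  apply List.filter_congr
  intro p hp
  have hmem : p.1 ∈ (c.items.filter (fun p => PySem.Set.len p.2 < 2)).map Prod.fst
      ↔ PySem.Set.len p.2 < 2 := by
    constructor
    · intro h
      obtain ⟨q, hq, hq1⟩ := List.mem_map.mp h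
      have := List.inj_on_of_nodup_map hkeys (List.mem_of_mem_filter hq) hp hq1
      rw [this] at hq
      simpa using (List.mem_filter.mp hq).2
    · intro h
      exact List.mem_map.mpr ⟨p, List.mem_filter.mpr ⟨hp, by simpa using h⟩, rfl⟩
  rw [show ((c.items.filter (fun p => PySem.Set.len p.2 < 2)).map Prod.fst).contains p.1
      = decide (PySem.Set.len p.2 < 2) from by
        rw [List.contains_eq_mem, decide_eq_decide]; exact hmem]
  simp only [← decide_not, decide_eq_decide, PySem.Set.len]
  omega

-- the value of the edge fold at a label is that label's subject list, when those are distinct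
theorem getD_edge_fold (E : List (String × String)) (d : PySem.Dict String (PySem.Set String))
    (l : String)
    (h : (d.getD l PySem.Set.empty ++ sidsOf E l).Nodup) :
    (E.foldl stepE d).getD l PySem.Set.empty = d.getD l PySem.Set.empty ++ sidsOf E l := by
  induction E generalizing d with
  | nil => simp [sidsOf]
  | cons q t ih =>
      by_cases hl : q.2 = l
      · have hs : sidsOf (q :: t) l = q.1 :: sidsOf t l := by simp [sidsOf, hl]
        rw [hs] at h
        have hnotmem : q.1 ∉ d.getD l ([] : PySem.Set String) :=
          fun hmem => (List.disjoint_of_nodup_append h) hmem (List.mem_cons_self ..)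
        have hadd : PySem.Set.add (d.getD l PySem.Set.empty) q.1
            = d.getD l PySem.Set.empty ++ [q.1] := by
          simp [PySem.Set.add, List.contains_eq_mem, hnotmem]
        have hgd : (stepE d q).getD l PySem.Set.empty
            = d.getD l PySem.Set.empty ++ [q.1] := by
          show (d.modify q.2 PySem.Set.empty (fun s => PySem.Set.add s q.1)).getD l PySem.Set.empty = _
          rw [hl, PySem.Dict.getD_modify_self]
          exact hadd
        rw [List.foldl_cons, ih (stepE d q) (by rw [hgd, List.append_assoc]; exact h), hgd, hs]
        simp
      · have hs : sidsOf (q :: t) l = sidsOf t l := by simp [sidsOf, hl]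
        have hgd : (stepE d q).getD l PySem.Set.empty = d.getD l PySem.Set.empty :=
          PySem.Dict.getD_modify_of_ne d PySem.Set.empty _ (fun hc => hl hc.symm)
        rw [hs] at h
        rw [List.foldl_cons, ih (stepE d q) (by rw [hgd]; exact h), hgd, hs]

-- keys of the edge fold: the distinct labels in first-occurrence order
theorem keys_edge_fold (E : List (String × String)) :
    (E.foldl stepE (PySem.Dict.empty : PySem.Dict String (PySem.Set String))).keys
      = PySem.Set.ofList (E.map (fun q => q.2)) := by
  have := PySem.Dict.keys_foldl_modify_key E (fun q => q.2) PySem.Set.empty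
    (fun _ q => fun s => PySem.Set.add s q.1) PySem.Dict.empty
  rw [PySem.Set.ofList_eq_foldl]
  exact this

-- items of the edge fold, characterised per label
theorem items_edge_fold (E : List (String × String))
    (h : ∀ l, (sidsOf E l).Nodup) :
    (E.foldl stepE (PySem.Dict.empty : PySem.Dict String (PySem.Set String))).items
      = (PySem.Set.ofList (E.map (fun q => q.2))).map (fun l => (l, sidsOf E l)) := by
  rw [PySem.Dict.items_eq_map_keys _ (by rw [keys_edge_fold]; exact PySem.Set.nodup_ofList _)
    PySem.Set.empty, keys_edge_fold]
  apply List.map_congr_left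
  intro l _
  have := getD_edge_fold E PySem.Dict.empty l (by simpa using h l)
  simpa using this

-- a Set.add seen through a filter
theorem filter_add (p : String → Bool) (s : PySem.Set String) (x : String) :
    (PySem.Set.add s x).filter p
      = if p x then PySem.Set.add (s.filter p) x else s.filter p := by
  by_cases hm : x ∈ s <;> by_cases hp : p x = true <;>
    simp [PySem.Set.add, List.contains_eq_mem, hm, hp, List.filter_append, List.mem_filter]

-- Set.ofList commutes with filter
theorem ofList_filter (xs : List String) (p : String → Bool) :
    PySem.Set.ofList (xs.filter p) = (PySem.Set.ofList xs).filter p := by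
  have aux : ∀ (xs : List String) (s : PySem.Set String),
      (xs.filter p).foldl PySem.Set.add (s.filter p) = (xs.foldl PySem.Set.add s).filter p := by
    intro xs
    induction xs with
    | nil => intro s; rfl
    | cons x t ih =>
        intro s
        by_cases hp : p x = true
        · rw [List.filter_cons_of_pos hp, List.foldl_cons, List.foldl_cons,
            ← ih (PySem.Set.add s x), filter_add, if_pos hp]
        · rw [List.filter_cons_of_neg (by simpa using hp), List.foldl_cons,
            ← ih (PySem.Set.add s x), filter_add, if_neg (by simpa using hp)]
  have := aux xs []
  rw [PySem.Set.ofList_eq_foldl, PySem.Set.ofList_eq_foldl]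
  simpa using this

-- a duplicate-free list filtered at one element
theorem filter_beq_nodup (l : List String) (h : l.Nodup) (a : String) :
    l.filter (· == a) = if a ∈ l then [a] else [] := by
  induction l with
  | nil => simp
  | cons x t ih =>
      simp only [List.nodup_cons] at h
      by_cases hx : x = a
      · subst hx
        rw [List.filter_cons_of_pos (by simp), ih h.2, if_neg h.1, if_pos (List.mem_cons_self ..)]
      · rw [List.filter_cons_of_neg (by simpa using hx), ih h.2]
        have hiff : (a = x ∨ a ∈ t) ↔ a ∈ t := by
          constructor
          · rintro (hc | hm)
            · exact absurd hc.symm hx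
            · exact hm
          · exact Or.inr
        simp only [List.mem_cons, hiff]

-- the per-label subject lists of the edge list are duplicate-free (Pre_: distinct sids)
theorem sidsOf_sublist (bs : List (String × List (List (String × String)))) (l : String) :
    List.Sublist (sidsOf (edgesOf bs) l) (bs.map Prod.fst) := by
  induction bs with
  | nil => simp [edgesOf, sidsOf]
  | cons e t ih =>
      by_cases h : pyLabels e.2 = []
      · have : edgesOf (e :: t) = edgesOf t := by
          simp [edgesOf, gEntry, h]
        rw [this, List.map_cons]
        exact ih.cons _
      · have hcons : edgesOf (e :: t) = (pyLabels e.2).map (fun label => (e.1, label)) ++ edgesOf t := by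
          simp [edgesOf, gEntry, h]
        have hblock : sidsOf ((pyLabels e.2).map (fun label => (e.1, label))) l
            = if l ∈ pyLabels e.2 then [e.1] else [] := by
          rw [sidsOf, List.filter_map, List.map_map,
            show List.filter ((fun (q : String × String) => q.2 == l) ∘ (fun label => (e.1, label))) (pyLabels e.2)
               = List.filter (fun x => x == l) (pyLabels e.2) from List.filter_congr (fun x _ => rfl),
            filter_beq_nodup (pyLabels e.2) (PySem.Set.nodup_ofList _) l]
          by_cases hm : l ∈ pyLabels e.2 <;> simp [hm]
        have happ : sidsOf (edgesOf (e :: t)) l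
            = sidsOf ((pyLabels e.2).map (fun label => (e.1, label))) l ++ sidsOf (edgesOf t) l := by
          rw [hcons]; simp [sidsOf, List.filter_append]
        rw [happ, hblock, List.map_cons]
        by_cases hm : l ∈ pyLabels e.2
        · rw [if_pos hm]
          exact List.Sublist.cons₂ _ ih
        · rw [if_neg hm]
          exact ih.cons _

theorem sidsOf_nodup (bs : List (String × List (List (String × String))))
    (hpre : (bs.map Prod.fst).Nodup) (l : String) : (sidsOf (edgesOf bs) l).Nodup :=
  (sidsOf_sublist bs l).nodup hpre

-- length of a label's subject list = the label's count among the edge labels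
theorem length_sidsOf (E : List (String × String)) (l : String) :
    (sidsOf E l).length = (E.map (fun q => q.2)).count l := by
  rw [sidsOf, List.length_map, ← List.countP_eq_length_filter, List.count_eq_countP,
    List.countP_map]
  apply List.countP_congr
  intro q _
  simp [Function.comp, BEq.comm]

-- B's selective dict fold, characterised: the common labels in first-occurrence order
theorem kept_B (bs : List (String × List (List (String × String))))
    (hpre : (bs.map Prod.fst).Nodup) :
    ((edgesOf bs).foldl (fun c q =>
        if 2 ≤ (PySem.Dict.counter ((edgesOf bs).map (fun q => q.2))).getD q.2 0 then stepE c q else c)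
      PySem.Dict.empty).items
    = ((PySem.Set.ofList ((edgesOf bs).map (fun q => q.2))).filter
          (fun l => decide (2 ≤ ((((edgesOf bs).map (fun q => q.2)).count l : Int))))).map
        (fun l => (l, sidsOf (edgesOf bs) l)) := by
  rw [PySem.List.foldl_ite_eq_foldl_filter
    (p := fun q : String × String => 2 ≤ (PySem.Dict.counter ((edgesOf bs).map (fun q => q.2))).getD q.2 0)
    (f := stepE)]
  have hnd' : ∀ l, (sidsOf ((edgesOf bs).filter
      (fun q => decide (2 ≤ (PySem.Dict.counter ((edgesOf bs).map (fun q => q.2))).getD q.2 0))) l).Nodup := by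
    intro l
    have hsub : List.Sublist
        (sidsOf ((edgesOf bs).filter
          (fun q => decide (2 ≤ (PySem.Dict.counter ((edgesOf bs).map (fun q => q.2))).getD q.2 0))) l)
        (sidsOf (edgesOf bs) l) := by
      rw [sidsOf, sidsOf]
      exact (List.filter_sublist.filter (fun q => q.2 == l)).map Prod.fst
    exact hsub.nodup (sidsOf_nodup bs hpre l)
  rw [items_edge_fold _ hnd']
  have hD' : ((edgesOf bs).filter
        (fun q => decide (2 ≤ (PySem.Dict.counter ((edgesOf bs).map (fun q => q.2))).getD q.2 0))).map
          (fun q => q.2)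
      = ((edgesOf bs).map (fun q => q.2)).filter
          (fun l => decide (2 ≤ ((((edgesOf bs).map (fun q => q.2)).count l : Int)))) := by
    rw [List.filter_map]
    congr 1
    apply List.filter_congr
    intro q _
    simp [Function.comp, PySem.Dict.getD_counter]
  rw [hD', ofList_filter]
  apply List.map_congr_left
  intro l hl
  have hbig : decide (2 ≤ ((((edgesOf bs).map (fun q => q.2)).count l : Int))) = true :=
    (List.mem_filter.mp hl).2
  have hfin : List.filter (fun q => q.2 == l) ((edgesOf bs).filter
      (fun q => decide (2 ≤ (PySem.Dict.counter ((edgesOf bs).map (fun q => q.2))).getD q.2 0)))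
      = List.filter (fun q => q.2 == l) (edgesOf bs) := by
    rw [List.filter_filter]
    apply List.filter_congr
    intro q _
    by_cases hq : q.2 = l
    · have := of_decide_eq_true hbig
      simp [hq, PySem.Dict.getD_counter, this]
    · simp [hq]
  rw [sidsOf, sidsOf, hfin]

theorem build_class_maps_py_spec : Claim_equal_build_class_maps_py := by
  intro bs _ hpre
  unfold Spec_build_class_maps_py
  have hnd : ∀ l, (sidsOf (edgesOf bs) l).Nodup := sidsOf_nodup bs hpre
  have hCitems : (bs.foldl stepC PySem.Dict.empty).items
      = (PySem.Set.ofList ((edgesOf bs).map (fun q => q.2))).map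
          (fun l => (l, sidsOf (edgesOf bs) l)) := by
    rw [foldC_eq_edge_fold]
    exact items_edge_fold _ hnd
  have hkeys : ((bs.foldl stepC PySem.Dict.empty).items.map Prod.fst).Nodup := by
    have hid : (Prod.fst ∘ fun l => (l, sidsOf (edgesOf bs) l)) = (id : String → String) := rfl
    rw [hCitems, List.map_map, hid, List.map_id]
    exact PySem.Set.nodup_ofList _
  simp only [build_class_maps_py, build_class_maps_py_alt, foldA_split, foldB_split,
    List.nil_append, foldB2_split, Prod.mk.injEq]
  refine ⟨?_, trivial, ?_⟩
  · -- kept classes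
    rw [tail_eq _ hkeys, hCitems, List.filter_map, kept_B bs hpre]
    congr 1
    apply List.filter_congr
    intro l _
    simp [Function.comp, PySem.Set.len, length_sidsOf]
  · -- excluded labels
    -- A's side: the rare labels of the inverse map, in key order
    rw [hCitems, List.filter_map, List.map_map]
    -- B's side: swap the if, fold the adds into Set.ofList
    have hswap : (fun (s : PySem.Set String) (q : String × String) =>
        if 2 ≤ (PySem.Dict.counter ((edgesOf bs).map (fun q => q.2))).getD q.2 0 then s
        else PySem.Set.add s q.2)
        = (fun s q =>
        if ¬ 2 ≤ (PySem.Dict.counter ((edgesOf bs).map (fun q => q.2))).getD q.2 0 then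
          PySem.Set.add s q.2 else s) := by
      funext s q
      by_cases h : 2 ≤ (PySem.Dict.counter ((edgesOf bs).map (fun q => q.2))).getD q.2 0
      · rw [if_pos h, if_neg (not_not_intro h)]
      · rw [if_neg h, if_pos h]
    rw [hswap, PySem.List.foldl_ite_eq_foldl_filter
      (p := fun q : String × String => ¬ 2 ≤ (PySem.Dict.counter ((edgesOf bs).map (fun q => q.2))).getD q.2 0)
      (f := fun s q => PySem.Set.add s q.2)]
    have hfoldadd : ∀ (m : List (String × String)),
        m.foldl (fun (s : PySem.Set String) q => PySem.Set.add s q.2) PySem.Set.empty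
          = PySem.Set.ofList (m.map (fun q => q.2)) := by
      intro m
      rw [PySem.Set.ofList_eq_foldl, List.foldl_map]
      rfl
    rw [hfoldadd]
    have hmapf : ((edgesOf bs).filter
        (fun q => decide (¬ 2 ≤ (PySem.Dict.counter ((edgesOf bs).map (fun q => q.2))).getD q.2 0))).map
          (fun q => q.2)
        = ((edgesOf bs).map (fun q => q.2)).filter
            (fun l => decide (¬ 2 ≤ ((((edgesOf bs).map (fun q => q.2)).count l : Int)))) := by
      rw [List.filter_map]
      congr 1
      apply List.filter_congr
      intro q _
      simp [Function.comp, PySem.Dict.getD_counter]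
    rw [hmapf, ofList_filter]
    have hid : (Prod.fst ∘ fun l => (l, sidsOf (edgesOf bs) l)) = (id : String → String) := rfl
    rw [hid, List.map_id]
    have hAnodup : ((PySem.Set.ofList ((edgesOf bs).map (fun q => q.2))).filter
        ((fun p : String × List String => decide (PySem.Set.len p.2 < 2)) ∘
          fun l => (l, sidsOf (edgesOf bs) l))).Nodup :=
      (PySem.Set.nodup_ofList _).filter _
    rw [PySem.Set.ofList_eq_self_of_nodup _ hAnodup]
    apply List.filter_congr
    intro l _
    have := length_sidsOf (edgesOf bs) l
    simp only [Function.comp, PySem.Set.len, this, decide_eq_decide]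
    omega
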